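-- pv_equiv track=rewrite | github.com/shadowcz007/comfyui-mixlab-nodes | nodes/PromptNode.py | prompt_delete_words
-- ===== SOURCE A (Python) =====
-- def prompt_delete_words(sentence, new_words_length):
--     # 使用逗号分割句子，并去除空格
--     words = [word.strip() for word in sentence.split(",")]
--
--     # 计算需要删除的单词数量
--     num_to_delete = len(words) - new_words_length
--
--     words_to=[w for w in words]
--
--     # 逐个删除单词并存储在新列表中
--     new_words = []
--     for i in range(len(words)):
--         if num_to_delete > 0:
--             num_to_delete -= 1
--         else:
--             words_to.pop()
--             if len(words_to)>0:
--                 new_words.append(", ".join(words_to))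
--
--     return new_words
-- ===== SOURCE B (Python) =====
-- def prompt_delete_words(sentence, new_words_length):
--     words = [w.strip() for w in sentence.split(",")]
--     n = len(words)
--     d = n - new_words_length
--     return [", ".join(words[:k]) for k in range(n - 1, max(d, 1) - 1, -1)]
-- ===== Notes on version B (the rewrite author's own statement) =====
-- stated objective: simpler
-- what changed: Replaces the counter-guarded loop that mutates a copy via pop() with a single comprehension that joins decreasing-length prefixes words[:k] for k in range(n-1, max(n-new_words_length,1)-1, -1).
import Mathlib
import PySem

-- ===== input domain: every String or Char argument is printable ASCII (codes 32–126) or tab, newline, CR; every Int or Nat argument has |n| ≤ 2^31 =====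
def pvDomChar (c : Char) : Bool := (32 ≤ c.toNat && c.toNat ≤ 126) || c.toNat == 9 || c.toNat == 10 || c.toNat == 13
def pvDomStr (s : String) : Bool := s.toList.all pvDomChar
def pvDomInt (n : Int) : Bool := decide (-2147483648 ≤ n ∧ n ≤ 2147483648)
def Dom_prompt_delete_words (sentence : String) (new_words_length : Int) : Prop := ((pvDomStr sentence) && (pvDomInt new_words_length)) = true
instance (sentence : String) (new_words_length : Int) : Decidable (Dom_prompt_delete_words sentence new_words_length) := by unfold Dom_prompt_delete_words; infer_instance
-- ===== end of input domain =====

-- B replaces A's counter-guarded pop loop over a mutated copy with one comprehension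
-- joining decreasing-length prefixes (objective: simpler).


-- ===== PORT A =====
-- the 'for i in range(len(words))' loop, recursing on the number of remaining iterations;
-- 'words_to.pop()' discards the popped value, so its effect is dropLast (it never pops an
-- empty list: the loop performs at most len(words) pops)
def pvLoopA (i : Nat) (d : Int) (t : List String) (acc : List String) : List String :=
  match i with
  | 0 => acc
  | i + 1 =>
    if d > 0 then pvLoopA i (d - 1) t acc
    else
      let t' := t.dropLast
      pvLoopA i d t' (if 0 < t'.length then acc ++ [PySem.Str.join ", " t'] else acc)

def prompt_delete_words (sentence : String) (new_words_length : Int) : List String :=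
  let words := (PySem.Chars.splitOn sentence.toList [',']).map (fun w => String.ofList (PySem.Chars.strip w))
  let num_to_delete : Int := (words.length : Int) - new_words_length
  let words_to := words.map (fun w => w)   -- [w for w in words]
  pvLoopA words.length num_to_delete words_to []

-- ===== PORT B =====
def prompt_delete_words_alt (sentence : String) (new_words_length : Int) : List String :=
  let words := (PySem.Chars.splitOn sentence.toList [',']).map (fun w => String.ofList (PySem.Chars.strip w))
  let n : Int := (words.length : Int)
  let d : Int := n - new_words_length
  (PySem.List.pyRange (n - 1) (max d 1 - 1) (-1)).map
    (fun k => PySem.Str.join ", " (PySem.List.slice words none (some k)))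

-- ===== PRECONDITION & SPEC =====
def Spec_prompt_delete_words (sentence : String) (new_words_length : Int) (out : List String) : Prop := out = prompt_delete_words_alt sentence new_words_length
instance (sentence : String) (new_words_length : Int) (out : List String) : Decidable (Spec_prompt_delete_words sentence new_words_length out) := by unfold Spec_prompt_delete_words; infer_instance

-- ===== CLAIM (what is proved, stated in full; the proofs are below) =====
def Claim_equal_prompt_delete_words : Prop := ∀ (sentence : String) (new_words_length : Int), Dom_prompt_delete_words sentence new_words_length → Spec_prompt_delete_words sentence new_words_length (prompt_delete_words sentence new_words_length)

-- ===== LEMMAS AND PROOFS =====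

-- the joins A's pop phase produces, as a standalone recursion
def pvPref (t : List String) (i : Nat) : List String :=
  match i with
  | 0 => []
  | i + 1 =>
    (if 0 < t.dropLast.length then [PySem.Str.join ", " t.dropLast] else []) ++
      pvPref t.dropLast i

-- phase 1: while the counter stays positive nothing is appended
theorem pvLoopA_skip (i : Nat) (d : Int) (t acc : List String) (h : (i : Int) ≤ d) :
    pvLoopA i d t acc = acc := by
  induction i generalizing d with
  | zero => rfl
  | succ i ih =>
    rw [pvLoopA, if_pos (by omega)]
    exact ih (d - 1) (by omega)

-- the counter phase consumes exactly d iterations, then the loop continues with counter 0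
theorem pvLoopA_shift (k i : Nat) (t acc : List String) :
    pvLoopA (k + i) (k : Int) t acc = pvLoopA i 0 t acc := by
  induction k with
  | zero => simp
  | succ k ih =>
    rw [show k + 1 + i = (k + i) + 1 from by omega, pvLoopA, if_pos (by omega)]
    simpa using ih

-- phase 2: with a non-positive counter the loop appends pvPref
theorem pvLoopA_pop (i : Nat) (d : Int) (t acc : List String) (h : d ≤ 0) :
    pvLoopA i d t acc = acc ++ pvPref t i := by
  induction i generalizing t acc with
  | zero => simp [pvLoopA, pvPref]
  | succ i ih =>
    rw [pvLoopA, if_neg (by omega), pvPref]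
    rw [ih]
    split_ifs <;> simp

-- pvPref lists the joins of the decreasing-length prefixes, empty prefix excluded
theorem pvPref_eq_map (i : Nat) (t : List String) (h : i ≤ t.length) :
    pvPref t i =
      (PySem.List.pyRange ((t.length : Int) - 1) (max ((t.length : Int) - i) 1 - 1) (-1)).map
        (fun k => PySem.Str.join ", " (t.take k.toNat)) := by
  induction i generalizing t with
  | zero =>
    rw [pvPref, PySem.List.pyRange_neg_one_eq_nil (by omega), List.map_nil]
  | succ i ih =>
    have hL : 1 ≤ t.length := by omega
    by_cases h1 : t.length = 1
    · have hi : i = 0 := by omega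
      subst hi
      rw [pvPref, pvPref]
      have : t.dropLast.length = 0 := by simp [h1]
      rw [if_neg (by omega)]
      rw [PySem.List.pyRange_neg_one_eq_nil (by rw [h1]; norm_num), List.map_nil, List.nil_append]
    · have hL2 : 2 ≤ t.length := by omega
      rw [pvPref]
      have hdl : t.dropLast.length = t.length - 1 := by simp
      rw [if_pos (by omega)]
      rw [PySem.List.pyRange_neg_one_cons (by omega), List.map_cons]
      have hdrop : t.dropLast = t.take ((t.length : Int) - 1).toNat := by
        rw [List.dropLast_eq_take]; congr 1; omega
      rw [ih t.dropLast (by omega), List.singleton_append, hdl]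
      have hrange : PySem.List.pyRange (((t.length - 1 : Nat) : Int) - 1)
            (max (((t.length - 1 : Nat) : Int) - (i : Int)) 1 - 1) (-1)
          = PySem.List.pyRange ((t.length : Int) - 1 - 1)
            (max ((t.length : Int) - ((i : Nat) + 1 : Int)) 1 - 1) (-1) := by
        congr 1 <;> omega
      rw [hrange]
      congr 1
      · rw [hdrop]
      · refine List.map_congr_left (fun k hk => ?_)
        obtain ⟨hk1, hk2⟩ := PySem.List.mem_pyRange_neg_one.1 hk
        have hk0 : 0 ≤ k := by omega
        congr 1
        rw [List.dropLast_eq_take, List.take_take]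
        congr 1
        omega

-- on the countdown ranges B uses, k is nonnegative, so words[:k] is take k
theorem pvTakeSlice (ws : List String) (a b : Int) (hb : 0 ≤ b) :
    (PySem.List.pyRange a b (-1)).map
        (fun k => PySem.Str.join ", " (PySem.List.slice ws none (some k)))
      = (PySem.List.pyRange a b (-1)).map
        (fun k => PySem.Str.join ", " (ws.take k.toNat)) :=
  List.map_congr_left fun k hk => by
    obtain ⟨h1, h2⟩ := PySem.List.mem_pyRange_neg_one.1 hk
    exact congrArg _ (PySem.List.slice_to ws (by omega))

theorem pvMain (ws : List String) (d : Int) :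
    pvLoopA ws.length d ws [] =
      (PySem.List.pyRange ((ws.length : Int) - 1) (max d 1 - 1) (-1)).map
        (fun k => PySem.Str.join ", " (PySem.List.slice ws none (some k))) := by
  by_cases hbig : (ws.length : Int) ≤ d
  · rw [pvLoopA_skip _ _ _ _ hbig, PySem.List.pyRange_neg_one_eq_nil (by omega), List.map_nil]
  · rw [pvTakeSlice _ _ _ (by omega)]
    by_cases hneg : d ≤ 0
    · rw [pvLoopA_pop _ _ _ _ hneg, List.nil_append, pvPref_eq_map _ _ (le_refl _)]
      congr 2
      omega
    · have h1 : pvLoopA ws.length d ws [] = pvLoopA (ws.length - d.toNat) 0 ws [] := by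
        calc pvLoopA ws.length d ws []
            = pvLoopA (d.toNat + (ws.length - d.toNat)) ((d.toNat : Nat) : Int) ws [] := by
              congr 1 <;> omega
          _ = pvLoopA (ws.length - d.toNat) 0 ws [] := pvLoopA_shift _ _ _ _
      rw [h1, pvLoopA_pop _ _ _ _ le_rfl, List.nil_append, pvPref_eq_map _ _ (by omega)]
      congr 2
      omega

-- ===== VERDICT (by name: the statement is the Claim_ definition above) =====
theorem prompt_delete_words_spec : Claim_equal_prompt_delete_words := by
  intro sentence new_words_length _hDom
  unfold Spec_prompt_delete_words prompt_delete_words prompt_delete_words_alt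
  simp only [List.map_id']
  exact pvMain _ _
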